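-- pv_equiv track=rewrite | github.com/wooandrich/codingTest | 프로그래머스/2/17687. ［3차］ n진수 게임/［3차］ n진수 게임.py | solution
-- ===== SOURCE A (Python) =====
-- def sol(num, n):
--     result = "0123456789ABCDEF"
--     q,r = divmod(num, n)
--
--     if q == 0:
--         return result[r]
--     return sol(q, n) + result[r]
--
-- def solution(n, t, m, p):
--     answer = ''
--     temp = ''
--
--     for i in range(m * t):
--         temp += sol(i, n)
--
--     for i in range(p-1, m*t, m):
--         answer += temp[i]
--
--     return answer
-- ===== SOURCE B (Python) =====
-- def solution(n, t, m, p):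
--     limit = m * t
--     buf = []
--     num = 0
--     while len(buf) < limit:
--         x = num
--         ds = []
--         while True:
--             x, r = divmod(x, n)
--             ds.append("0123456789ABCDEF"[r])
--             if x == 0:
--                 break
--         buf.extend(reversed(ds))
--         num += 1
--     return ''.join(buf)[p-1:limit:m]
-- ===== Notes on version B (the rewrite author's own statement) =====
-- stated objective: idiomatic
-- what changed: Replaces the recursive base-n helper with an inline iterative divmod loop, builds the digit buffer only until it covers index m*t-1 (early stop) instead of converting all m*t numbers, and extracts the answer with one stride slice temp[p-1:m*t:m] instead of a char-by-char index loop.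
-- outside the precondition, e.g. on solution(2, 1, 2, 0): A returns '11', B returns '1'; on solution(1, 2, 1, 1): A raises RecursionError, B does not finish within the time limit; on solution(17, 2, 16, 1): A raises IndexError, B raises IndexError
import Mathlib
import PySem

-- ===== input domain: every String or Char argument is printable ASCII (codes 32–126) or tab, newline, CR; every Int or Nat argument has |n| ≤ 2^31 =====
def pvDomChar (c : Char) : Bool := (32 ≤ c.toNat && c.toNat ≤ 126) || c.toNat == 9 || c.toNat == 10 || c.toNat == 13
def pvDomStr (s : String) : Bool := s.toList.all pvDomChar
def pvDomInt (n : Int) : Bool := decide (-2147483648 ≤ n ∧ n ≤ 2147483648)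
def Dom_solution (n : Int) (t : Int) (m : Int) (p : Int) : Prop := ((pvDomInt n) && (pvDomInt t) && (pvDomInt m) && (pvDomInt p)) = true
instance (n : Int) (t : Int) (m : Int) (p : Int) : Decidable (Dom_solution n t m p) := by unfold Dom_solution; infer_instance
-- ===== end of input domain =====

-- B replaces A's recursive base-n helper and the two string-building loops by an
-- iterative divmod digit loop, an early-stopping build (stop once the buffer covers
-- index m*t-1) and a single stride slice temp[p-1:m*t:m]; proved to return A's exact string on Pre_.
-- Ports work on List Char and wrap with String.ofList at the end (string += is list append).

-- ===== PORT A =====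
def pvDigits : List Char := "0123456789ABCDEF".toList

-- A's recursive helper sol(num, n); fuel only makes the recursion structural
-- (fuel num.toNat+1 is always enough on Pre_'s domain 0 ≤ num, 2 ≤ n).
def solA : Nat → Int → Int → List Char
  | 0, _, _ => []
  | f+1, num, n =>
    let q := PySem.Int.floordiv num n
    let r := PySem.Int.mod num n
    let c := (PySem.List.pyGet? pvDigits r).elim [] (fun ch => [ch])  -- result[r]
    if q = 0 then c else solA f q n ++ c

def solution (n : Int) (t : Int) (m : Int) (p : Int) : String :=
  let temp := (PySem.List.pyRange 0 (m * t) 1).foldl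
      (fun acc i => acc ++ solA (i.toNat + 1) i n) []
  let answer := (PySem.List.pyRange (p - 1) (m * t) m).foldl
      (fun acc i => acc ++ (PySem.List.pyGet? temp i).elim [] (fun ch => [ch])) []
  String.ofList answer

-- ===== PORT B =====
-- inner 'while True: x, r = divmod(x, n); ds.append(digit); if x == 0: break'
def digitsB : Nat → Int → Int → List Char
  | 0, _, _ => []
  | f+1, x, n =>
    let q := PySem.Int.floordiv x n
    let r := PySem.Int.mod x n
    let c := (PySem.List.pyGet? pvDigits r).elim [] (fun ch => [ch])
    if q = 0 then c else c ++ digitsB f q n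

-- outer 'while len(buf) < limit': each pass appends ≥ 1 char, so fuel limit.toNat suffices
def buildB : Nat → Int → Int → Int → List Char → List Char
  | 0, _, _, _, buf => buf
  | f+1, limit, num, n, buf =>
    if (buf.length : Int) < limit then
      buildB f limit (num + 1) n (buf ++ (digitsB (num.toNat + 1) num n).reverse)
    else buf

def solution_alt (n : Int) (t : Int) (m : Int) (p : Int) : String :=
  let limit := m * t
  let buf := buildB limit.toNat limit 0 n []
  String.ofList ((PySem.List.slice? buf (some (p - 1)) (some limit) m).getD [])

-- ===== PRECONDITION & SPEC =====
-- Pre_ is the puzzle's stated domain (base 2..16, m ≥ 1, t ≥ 0, p ≥ 1) plus the degenerate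
-- inputs whose both loops are over empty ranges (A returns ''). Outside it A raises
-- (ZeroDivisionError / IndexError / unbounded recursion for n ∉ [2,16], ValueError for m = 0,
-- IndexError when the index loop hits an empty temp) — except the corners where A's value comes
-- from Python's accidental negative-index wraparound into temp (p ≤ 0, or n < 0 where sol's
-- result[r] wraps for negative r), a corner artefact no spec fixes; B slices / raises there.
def Pre_solution (n : Int) (t : Int) (m : Int) (p : Int) : Prop :=
  (2 ≤ n ∧ n ≤ 16 ∧ 1 ≤ m ∧ 0 ≤ t ∧ 1 ≤ p) ∨
  (m * t ≤ 0 ∧ m ≠ 0 ∧ ((0 < m ∧ m * t ≤ p - 1) ∨ (m < 0 ∧ p - 1 ≤ m * t)))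
instance (n : Int) (t : Int) (m : Int) (p : Int) : Decidable (Pre_solution n t m p) := by
  unfold Pre_solution; infer_instance

def pvWitness_solution : Int × Int × Int × Int := (2, 4, 2, 1)

def Spec_solution (n : Int) (t : Int) (m : Int) (p : Int) (out : String) : Prop := out = solution_alt n t m p
instance (n : Int) (t : Int) (m : Int) (p : Int) (out : String) : Decidable (Spec_solution n t m p out) := by unfold Spec_solution; infer_instance

-- ===== CLAIM (what is proved, stated in full; the proofs are below) =====
def Claim_equal_solution : Prop := ∀ (n : Int) (t : Int) (m : Int) (p : Int), Dom_solution n t m p → Pre_solution n t m p → Spec_solution n t m p (solution n t m p)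

-- ===== LEMMAS AND PROOFS =====

def pvF (n i : Int) : List Char := solA (i.toNat + 1) i n
def pvG (n i : Int) : List Char := (digitsB (i.toNat + 1) i n).reverse
def pvS (n k : Int) : List Char := (PySem.List.pyRange 0 k 1).flatMap (pvG n)

lemma pvC_rev (o : Option Char) :
    (o.elim [] (fun ch => [ch]) : List Char).reverse = o.elim [] (fun ch => [ch]) := by
  cases o <;> rfl

lemma pvGet_nonneg (xs : List Char) (i : Int) (h : 0 ≤ i) :
    PySem.List.pyGet? xs i = xs[i.toNat]? := by
  simp only [PySem.List.pyGet?, PySem.List.pyIdx?, if_pos h]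
  split
  · simp
  · rename_i h2
    rw [List.getElem?_eq_none (by omega)]
    simp

-- the digit character is always found: 0 ≤ x % n < n ≤ 16 = pvDigits.length
lemma pvC_some (x n : Int) (hn : 2 ≤ n) (h16 : n ≤ 16) :
    ∃ ch, PySem.List.pyGet? pvDigits (PySem.Int.mod x n) = some ch := by
  have h0 := PySem.Int.mod_nonneg x (by omega : (0:Int) < n)
  have h1 := PySem.Int.mod_lt x (by omega : (0:Int) < n)
  rw [pvGet_nonneg _ _ h0]
  have hlen : pvDigits.length = 16 := by decide
  have hlt : (PySem.Int.mod x n).toNat < pvDigits.length := by omega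
  exact ⟨_, List.getElem?_eq_getElem hlt⟩

lemma pvDigitsB_ne (f : Nat) (x n : Int) (hn : 2 ≤ n) (h16 : n ≤ 16) (hf : 0 < f) :
    digitsB f x n ≠ [] := by
  obtain ⟨f, rfl⟩ : ∃ g, f = g + 1 := ⟨f - 1, by omega⟩
  obtain ⟨ch, hch⟩ := pvC_some x n hn h16
  simp only [digitsB, hch]
  split <;> simp

lemma pvSolA_eq (f : Nat) (num n : Int) (h0 : 0 ≤ num) (hn : 2 ≤ n) (hf : num.toNat < f) :
    solA f num n = (digitsB f num n).reverse := by
  induction f generalizing num with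
  | zero => omega
  | succ f ih =>
    simp only [solA, digitsB]
    split
    · exact (pvC_rev _).symm
    · rename_i hq
      have hdiv : PySem.Int.floordiv num n = num / n :=
        PySem.Int.floordiv_eq_ediv_of_pos (by omega)
      have hne : num ≠ 0 := by
        intro h; subst h; rw [hdiv] at hq; simp at hq
      have hq0 : 0 ≤ PySem.Int.floordiv num n := by
        rw [hdiv]; exact Int.ediv_nonneg h0 (by omega)
      have hpos : 0 < num := lt_of_le_of_ne h0 (Ne.symm hne)
      have h2n : num * 2 ≤ num * n := mul_le_mul_of_nonneg_left hn h0
      have hlt : PySem.Int.floordiv num n < num :=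
        (PySem.Int.floordiv_lt_iff_lt_mul (by omega)).mpr (by linarith)
      rw [List.reverse_append, pvC_rev, ih _ hq0 (by omega)]

lemma pvF_eq_G (n i : Int) (h0 : 0 ≤ i) (hn : 2 ≤ n) : pvF n i = pvG n i :=
  pvSolA_eq (i.toNat + 1) i n h0 hn (by omega)

lemma pvG_len (n i : Int) (hn : 2 ≤ n) (h16 : n ≤ 16) : 1 ≤ (pvG n i).length := by
  have h := pvDigitsB_ne (i.toNat + 1) i n hn h16 (by omega)
  simp only [pvG, List.length_reverse]
  rcases List.eq_nil_or_concat (digitsB (i.toNat + 1) i n) with h' | ⟨l, a, h'⟩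
  · exact absurd h' h
  · simp [h']

lemma pvS_succ (n : Int) (k : Int) (h : 0 ≤ k) :
    pvS n (k + 1) = pvS n k ++ (digitsB (k.toNat + 1) k n).reverse := by
  simp only [pvS]
  rw [PySem.List.pyRange_one_succ_right (by omega), List.flatMap_append]
  simp [pvG]

lemma pvS_len (n : Int) (hn : 2 ≤ n) (h16 : n ≤ 16) (j : Nat) :
    j ≤ (pvS n (j : Int)).length := by
  induction j with
  | zero => simp [pvS]
  | succ j ih =>
    have hc : ((j : Int) + 1) = ((j + 1 : Nat) : Int) := by push_cast; ring
    rw [← hc, pvS_succ n j (by omega), List.length_append]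
    have := pvG_len n j hn h16
    simp only [pvG] at this
    omega

lemma pvS_len_int (n : Int) (hn : 2 ≤ n) (h16 : n ≤ 16) (k : Int) (h : 0 ≤ k) :
    k ≤ ((pvS n k).length : Int) := by
  have := pvS_len n hn h16 k.toNat
  have hk : ((k.toNat : Int)) = k := by omega
  rw [hk] at this
  omega

lemma pvS_prefix (n k k' : Int) (h0 : 0 ≤ k) (h : k ≤ k') :
    pvS n k' = pvS n k ++ (PySem.List.pyRange k k' 1).flatMap (pvG n) := by
  simp only [pvS]
  rw [PySem.List.pyRange_one_append 0 k k' h0 h, List.flatMap_append]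

lemma pvBuild_spec (L n : Int) (hn : 2 ≤ n) (h16 : n ≤ 16) :
    ∀ (fuel : Nat) (num : Int), 0 ≤ num → L ≤ ((pvS n num).length : Int) + fuel →
    ∃ K : Int, 0 ≤ K ∧ buildB fuel L num n (pvS n num) = pvS n K ∧ L ≤ ((pvS n K).length : Int) := by
  intro fuel
  induction fuel with
  | zero =>
    intro num h0 hL
    exact ⟨num, h0, rfl, by simpa using hL⟩
  | succ f ih =>
    intro num h0 hL
    simp only [buildB]
    split
    · rw [← pvS_succ n num h0]
      have hg := pvG_len n num hn h16
      have hL' : L ≤ ((pvS n (num + 1)).length : Int) + f := by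
        rw [pvS_succ n num h0, List.length_append]
        simp only [pvG] at hg
        push_cast at hL ⊢
        omega
      exact ih (num + 1) (by omega) hL'
    · exact ⟨num, h0, rfl, by omega⟩

lemma pvRead_agree (n K L : Int) (hK : 0 ≤ K) (hL : 0 ≤ L) (hn : 2 ≤ n) (h16 : n ≤ 16)
    (hlen : L ≤ ((pvS n K).length : Int)) (j : Nat) (hj : (j : Int) < L) :
    (pvS n K)[j]? = (pvS n L)[j]? := by
  have hLlen := pvS_len_int n hn h16 L hL
  rcases le_total K L with h | h
  · rw [pvS_prefix n K L hK h, List.getElem?_append_left (by omega)]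
  · rw [pvS_prefix n L K hL h, List.getElem?_append_left (by omega)]

lemma pvFlatMap_elim_eq_filterMap (l : List Nat) (f g : Nat → Option Char)
    (h : ∀ k ∈ l, f k = g k) :
    l.flatMap (fun k => (f k).elim [] (fun ch => [ch])) = l.filterMap g := by
  induction l with
  | nil => rfl
  | cons a l ih =>
    rw [List.flatMap_cons, List.filterMap_cons, h a List.mem_cons_self,
      ih (fun k hk => h k (List.mem_cons_of_mem a hk))]
    cases g a <;> rfl

lemma pvSlice_pos (xs : List Char) (a b st : Int) (ha : 0 ≤ a) (hb : 0 ≤ b)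
    (hblen : b ≤ (xs.length : Int)) (hst : 0 < st) :
    PySem.List.slice? xs (some a) (some b) st =
      some (List.filterMap (fun k : Nat => xs[(min a (xs.length : Int) + st * (k : Int)).toNat]?)
        (List.range (if min a (xs.length : Int) < b then
          ((b - min a (xs.length : Int) + st - 1) / st).toNat else 0))) := by
  simp only [PySem.List.slice?, PySem.List.sliceIndices]
  rw [if_neg (by omega : ¬ st = 0)]
  simp only [if_neg (by omega : ¬ st < 0), if_pos hst]
  rw [if_neg (by omega : ¬ a < 0), if_neg (by omega : ¬ b < 0)]
  rw [min_eq_left hblen]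

lemma pvSlice_nil (a? b? : Option Int) (st : Int) (hst : ¬ st = 0) :
    PySem.List.slice? ([] : List Char) a? b? st = some [] := by
  simp [PySem.List.slice?, PySem.List.sliceIndices, hst]

-- ===== VERDICT (by name: the statement is the Claim_ definition above) =====
theorem solution_spec : Claim_equal_solution := by
  intro n t m p hDom hPre
  rcases hPre with hPre | ⟨hmt, hm0, hcase⟩
  case inr =>
    -- both loops are over empty ranges: A and B both return the empty string
    simp only [Spec_solution, solution, solution_alt]
    have h1 : PySem.List.pyRange 0 (m * t) 1 = [] := PySem.List.pyRange_one_eq_nil hmt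
    have h2 : PySem.List.pyRange (p - 1) (m * t) m = [] := by
      simp only [PySem.List.pyRange, if_neg hm0]
      rcases hcase with ⟨hpos, hge⟩ | ⟨hneg, hle⟩
      · rw [if_pos hpos, if_neg (by omega)]; simp
      · rw [if_neg (by omega), if_neg (by omega)]; simp
    have h3 : (m * t).toNat = 0 := by omega
    rw [h1, h2, h3]
    simp only [List.foldl_nil]
    have h4 : buildB 0 (m * t) 0 n [] = [] := rfl
    rw [h4, pvSlice_nil _ _ _ hm0]
    rfl
  obtain ⟨hn, h16, hm, ht, hp⟩ := hPre
  simp only [Spec_solution, solution, solution_alt]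
  set L := m * t with hLdef
  have hL : 0 ≤ L := mul_nonneg (by omega) ht
  have htemp : (PySem.List.pyRange 0 L 1).foldl (fun acc i => acc ++ solA (i.toNat + 1) i n) []
      = pvS n L := by
    rw [PySem.List.foldl_append_eq_flatMap (fun i => solA (i.toNat + 1) i n)]
    simp only [List.nil_append, pvS]
    apply List.flatMap_congr
    intro i hi
    have := (PySem.List.mem_pyRange_one).mp hi
    exact pvF_eq_G n i (by omega) hn
  obtain ⟨K, hK0, hbuf, hKlen⟩ :=
    pvBuild_spec L n hn h16 L.toNat 0 le_rfl (by simp [pvS])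
  have hbuf' : buildB L.toNat L 0 n [] = pvS n K := by
    have h0 : pvS n 0 = [] := by simp [pvS]
    rw [← h0]; exact hbuf
  rw [htemp, hbuf']
  apply congrArg String.ofList
  rw [PySem.List.foldl_append_eq_flatMap
    (fun i => (PySem.List.pyGet? (pvS n L) i).elim [] (fun ch => [ch]))]
  rw [List.nil_append]
  have hm0 : (0:Int) < m := by omega
  rw [PySem.List.pyRange_of_pos (p-1) L hm0]
  rw [pvSlice_pos (pvS n K) (p-1) L m (by omega) hL hKlen hm0]
  by_cases hpb : p - 1 < L
  · -- nonempty stride range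
    have hmin : min (p-1) ((pvS n K).length : Int) = p - 1 := min_eq_left (by omega)
    rw [hmin, if_pos hpb, Option.getD_some, List.flatMap_map]
    apply pvFlatMap_elim_eq_filterMap
    intro k hk
    rw [List.mem_range] at hk
    set D := L - (p - 1) with hD
    set cntI := (D + m - 1) / m with hcnt
    have hkI : (k : Int) < cntI := by
      have : (k:Int) < (cntI.toNat : Int) := by exact_mod_cast hk
      omega
    have hdiv : m * cntI + (D + m - 1) % m = D + m - 1 := Int.mul_ediv_add_emod _ _
    have hmod : 0 ≤ (D + m - 1) % m := Int.emod_nonneg _ (by omega)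
    have hmk : m * (k:Int) ≤ m * (cntI - 1) := mul_le_mul_of_nonneg_left (by omega) (by omega)
    have hik : p - 1 + m * (k:Int) < L := by
      have : m * (cntI - 1) = m * cntI - m := by ring
      omega
    have hik0 : 0 ≤ p - 1 + m * (k:Int) := by
      have : 0 ≤ m * (k:Int) := mul_nonneg (by omega) (by omega)
      omega
    rw [pvGet_nonneg _ _ hik0]
    exact (pvRead_agree n K L hK0 hL hn h16 hKlen _ (by omega)).symm
  · -- empty stride range on both sides
    rw [if_neg hpb, if_neg (by omega : ¬ min (p-1) ((pvS n K).length : Int) < L)]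
    simp
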